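-- pv_equiv track=rewrite | github.com/stsewd/devsucodejam-2019 | 07.py | mob
-- ===== SOURCE A (Python) =====
-- def mob(n):
--     default = '(O_o)'
--     if not n or not (1 <= n <= 255):
--         return default
--
--     guy = '(-_-)'
--     guy_sl = '(-_'
--     guy_sr = '_-)'
--     guy_pl = '(-_-'
--     guy_pr = '-_-)'
--     guy_fl = '(-'
--     guy_fr = '-)'
--
--     guys = [''] * n
--
--     # Guy in the middle
--     middle = n // 2
--     guys[middle] = guy
--
--     for i in range((n - middle) // 3):
--         g = middle - (i + 1) * 3
--         if 0 <= g < n: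
--             guys[g] = guy_pl
--
--         g = middle + (i + 1) * 3
--         if 0 <= g < n:
--             guys[g] = guy_pr
--
--     for i in range(n):
--         if guys[i]:
--             continue
--         if i < middle:
--             guys[i] = guy_sl
--         else:
--             guys[i] = guy_sr
--
--     if n > 7:
--         guys[0] = guy_fl
--         guys[-1] = guy_fr
--
--     return ''.join(guys)
-- ===== SOURCE B (Python) =====
-- def mob(n):
--     if not n or not (1 <= n <= 255):
--         return '(O_o)'
--     middle = n // 2
--     k = (n - middle) // 3
--     parts = []
--     for i in range(n):
--         d = i - middle
--         if n > 7 and i == 0: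
--             parts.append('(-')
--         elif n > 7 and i == n - 1:
--             parts.append('-)')
--         elif d == 0:
--             parts.append('(-_-)')
--         elif d > 0 and d % 3 == 0 and d // 3 <= k:
--             parts.append('-_-)')
--         elif d < 0 and (-d) % 3 == 0 and (-d) // 3 <= k:
--             parts.append('(-_-')
--         elif i < middle:
--             parts.append('(-_')
--         else:
--             parts.append('_-)')
--     return ''.join(parts)
-- ===== Notes on version B (the rewrite author's own statement) =====
-- stated objective: simpler
-- what changed: B decides each slot directly from its offset to the middle in a single left-to-right pass building the list of parts, instead of A's three-phase in-place mutation of a preallocated list (seed middle, scatter pl/pr marks with bounds clipping, fill gaps, then patch the ends).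
import Mathlib
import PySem

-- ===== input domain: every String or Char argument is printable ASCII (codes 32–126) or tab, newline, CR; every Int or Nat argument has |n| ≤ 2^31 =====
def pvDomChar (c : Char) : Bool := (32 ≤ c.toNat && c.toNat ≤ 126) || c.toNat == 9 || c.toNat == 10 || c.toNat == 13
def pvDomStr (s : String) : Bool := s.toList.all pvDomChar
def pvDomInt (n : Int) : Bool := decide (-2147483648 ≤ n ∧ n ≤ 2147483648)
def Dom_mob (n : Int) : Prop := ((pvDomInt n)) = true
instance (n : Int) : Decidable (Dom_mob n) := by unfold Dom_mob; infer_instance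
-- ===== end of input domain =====

-- B decides each slot directly from its offset to the middle in a single pass,
-- instead of A's three-phase in-place mutation of a preallocated list (objective: simpler decomposition).

-- ===== PORT A =====
def mob (n : Int) : String :=
  let default := "(O_o)"
  if n = 0 ∨ ¬ (1 ≤ n ∧ n ≤ 255) then default
  else
    let guy := "(-_-)"
    let guy_sl := "(-_"
    let guy_sr := "_-)"
    let guy_pl := "(-_-"
    let guy_pr := "-_-)"
    let guy_fl := "(-"
    let guy_fr := "-)"
    let guys : List String := List.replicate n.toNat ""
    let middle := PySem.Int.floordiv n 2
    let guys := guys.set middle.toNat guy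
    let guys := (PySem.List.pyRange 0 (PySem.Int.floordiv (n - middle) 3) 1).foldl
      (fun guys i =>
        let g := middle - (i + 1) * 3
        let guys := if 0 ≤ g ∧ g < n then guys.set g.toNat guy_pl else guys
        let g := middle + (i + 1) * 3
        if 0 ≤ g ∧ g < n then guys.set g.toNat guy_pr else guys) guys
    let guys := (PySem.List.pyRange 0 n 1).foldl
      (fun guys i =>
        if ((PySem.List.pyGet? guys i).getD "") ≠ "" then guys
        else if i < middle then guys.set i.toNat guy_sl
        else guys.set i.toNat guy_sr) guys
    let guys := if n > 7 then (guys.set 0 guy_fl).set (n - 1).toNat guy_fr else guys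
    String.join guys

-- ===== PORT B =====
def mob_alt (n : Int) : String :=
  if n = 0 ∨ ¬ (1 ≤ n ∧ n ≤ 255) then "(O_o)"
  else
    let middle := PySem.Int.floordiv n 2
    let k := PySem.Int.floordiv (n - middle) 3
    let parts := (PySem.List.pyRange 0 n 1).foldl
      (fun parts i =>
        let d := i - middle
        parts ++ [
          if n > 7 ∧ i = 0 then "(-"
          else if n > 7 ∧ i = n - 1 then "-)"
          else if d = 0 then "(-_-)"
          else if 0 < d ∧ PySem.Int.mod d 3 = 0 ∧ PySem.Int.floordiv d 3 ≤ k then "-_-)"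
          else if d < 0 ∧ PySem.Int.mod (-d) 3 = 0 ∧ PySem.Int.floordiv (-d) 3 ≤ k then "(-_-"
          else if i < middle then "(-_"
          else "_-)"]) []
    String.join parts

-- ===== PRECONDITION & SPEC =====
def Spec_mob (n : Int) (out : String) : Prop := out = mob_alt n
instance (n : Int) (out : String) : Decidable (Spec_mob n out) := by unfold Spec_mob; infer_instance

-- ===== CLAIM (what is proved, stated in full; the proofs are below) =====
def Claim_equal_mob : Prop := ∀ (n : Int), Dom_mob n → Spec_mob n (mob n)

-- ===== LEMMAS AND PROOFS =====
theorem foldl_len {α : Type} (F : List String → α → List String)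
    (hF : ∀ gs i, (F gs i).length = gs.length) (l : List α) (gs : List String) :
    (l.foldl F gs).length = gs.length := by
  induction l generalizing gs with
  | nil => rfl
  | cons x xs ih => simp [List.foldl_cons, ih, hF]

theorem getD_set (l : List String) (i j : Nat) (a : String) :
    (l.set i a).getD j "" = if i = j ∧ j < l.length then a else l.getD j "" := by
  rcases Nat.lt_or_ge j l.length with hj | hj
  · by_cases hij : i = j
    · subst hij
      simp [List.getD_eq_getElem?_getD, hj]
    · simp [List.getD_eq_getElem?_getD, hij, hj]
  · have : ¬ (i = j ∧ j < l.length) := by omega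
    simp [this, List.getD_eq_getElem?_getD, List.getElem?_eq_none (by simpa using hj),
      List.getElem?_eq_none (l := l.set i a) (by simpa using hj)]

theorem scatter_get (n : Int) (hn : 1 ≤ n) (F : List String → Int → List String)
    (hF : ∀ gs i, F gs i =
      if 0 ≤ n / 2 + (i + 1) * 3 ∧ n / 2 + (i + 1) * 3 < n then
        (if 0 ≤ n / 2 - (i + 1) * 3 ∧ n / 2 - (i + 1) * 3 < n then
          gs.set (n / 2 - (i + 1) * 3).toNat "(-_-" else gs).set (n / 2 + (i + 1) * 3).toNat "-_-)"
      else if 0 ≤ n / 2 - (i + 1) * 3 ∧ n / 2 - (i + 1) * 3 < n then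
        gs.set (n / 2 - (i + 1) * 3).toNat "(-_-" else gs)
    (m : Nat) (gs : List String) (hlen : gs.length = n.toNat) (j : Nat) (hj : (j : Int) < n) :
    ((List.range m).foldl (fun gs (k : Nat) => F gs ((0 : Int) + (k : Int))) gs).getD j "" =
      if (j : Int) < n / 2 ∧ (n / 2 - (j : Int)) % 3 = 0 ∧ n / 2 - (j : Int) ≤ 3 * (m : Int) then "(-_-"
      else if n / 2 < (j : Int) ∧ ((j : Int) - n / 2) % 3 = 0 ∧ (j : Int) - n / 2 ≤ 3 * (m : Int) then "-_-)"
      else gs.getD j "" := by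
  have hFlen : ∀ gs i, (F gs i).length = gs.length := by
    intro gs i; rw [hF]; split_ifs <;> simp
  induction m generalizing gs with
  | zero =>
    simp only [List.range_zero, List.foldl_nil, Nat.cast_zero]
    split_ifs with h1 h2 <;> first | rfl | omega
  | succ m ih =>
    rw [List.range_succ, List.foldl_append, List.foldl_cons, List.foldl_nil, hF]
    have hlen' : ((List.range m).foldl (fun gs (k : Nat) => F gs ((0 : Int) + (k : Int))) gs).length = n.toNat := by
      rw [foldl_len _ (fun gs k => hFlen gs _)]; exact hlen
    split_ifs with c1 c2 <;>
      simp only [getD_set, List.length_set, hlen', ih gs hlen] <;>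
      split_ifs <;> first | rfl | omega

theorem fill_get (n : Int) (hn : 1 ≤ n) (F : List String → Int → List String)
    (hF : ∀ gs i, F gs i =
      if ((PySem.List.pyGet? gs i).getD "") ≠ "" then gs
      else if i < n / 2 then gs.set i.toNat "(-_"
      else gs.set i.toNat "_-)")
    (m : Nat) (gs : List String) (hlen : gs.length = n.toNat) (hm : m ≤ n.toNat) :
    ∀ (j : Nat), j < n.toNat →
    ((List.range m).foldl (fun gs (k : Nat) => F gs ((0 : Int) + (k : Int))) gs).getD j "" =
      if j < m then
        (if gs.getD j "" ≠ "" then gs.getD j ""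
         else if (j : Int) < n / 2 then "(-_" else "_-)")
      else gs.getD j "" := by
  have hFlen : ∀ gs i, (F gs i).length = gs.length := by
    intro gs i; rw [hF]; split_ifs <;> simp
  induction m generalizing gs with
  | zero => intro j hj; simp
  | succ m ih =>
    intro j hj
    rw [List.range_succ, List.foldl_append, List.foldl_cons, List.foldl_nil, hF]
    have hlen' : ((List.range m).foldl (fun gs (k : Nat) => F gs ((0 : Int) + (k : Int))) gs).length = n.toNat := by
      rw [foldl_len _ (fun gs k => hFlen gs _)]; exact hlen
    have hmn : m < n.toNat := by omega
    have hread : ((PySem.List.pyGet? ((List.range m).foldl (fun gs (k : Nat) => F gs ((0 : Int) + (k : Int))) gs) ((0 : Int) + (m : Int))).getD "") = gs.getD m "" := by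
      rw [show ((0 : Int) + (m : Int)) = ((m : Nat) : Int) by omega, PySem.List.pyGet?_natCast]
      rw [List.getElem?_eq_getElem (by omega : m < _), Option.getD_some]
      have h2 : ((List.range m).foldl (fun gs (k : Nat) => F gs ((0 : Int) + (k : Int))) gs).getD m "" = gs.getD m "" := by
        rw [ih gs hlen (by omega) m (by omega)]; simp
      rw [← h2, List.getD_eq_getElem _ _ (by omega)]
    rw [hread]
    split_ifs with c1 <;>
      simp only [getD_set, hlen', ih gs hlen (by omega) j hj] <;>
      split_ifs <;> try rfl
    all_goals try omega
    all_goals (have hjm : j = m := (by omega); exfalso; subst hjm; simp_all)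
set_option maxHeartbeats 3200000 in
theorem mob_spec' (n : Int) (h : ¬(n = 0 ∨ ¬ (1 ≤ n ∧ n ≤ 255))) : mob n = mob_alt n := by
  have hn1 : 1 ≤ n := by by_contra hc; exact h (by omega)
  simp only [mob, mob_alt, if_neg h]
  simp only [PySem.List.pyRange_one, Int.sub_zero, List.foldl_map,
    PySem.Int.floordiv_eq_ediv_of_pos (by norm_num : (0:Int) < 2),
    PySem.Int.floordiv_eq_ediv_of_pos (by norm_num : (0:Int) < 3),
    PySem.Int.mod_eq_emod_of_pos (by norm_num : (0:Int) < 3)]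
  rw [PySem.List.foldl_append_singleton_eq_map, List.nil_append]
  -- named pieces
  have hp1len : ((List.replicate n.toNat "").set (n / 2).toNat "(-_-)").length = n.toNat := by simp
  have hp1get : ∀ j : Nat, ((List.replicate n.toNat "").set (n / 2).toNat "(-_-)").getD j "" =
      if (n / 2).toNat = j ∧ j < n.toNat then "(-_-)" else "" := by
    intro j; rw [getD_set]; simp
  have hsc := scatter_get n hn1
    (fun gs i =>
      if 0 ≤ n / 2 + (i + 1) * 3 ∧ n / 2 + (i + 1) * 3 < n then
        (if 0 ≤ n / 2 - (i + 1) * 3 ∧ n / 2 - (i + 1) * 3 < n then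
          gs.set (n / 2 - (i + 1) * 3).toNat "(-_-" else gs).set (n / 2 + (i + 1) * 3).toNat "-_-)"
      else if 0 ≤ n / 2 - (i + 1) * 3 ∧ n / 2 - (i + 1) * 3 < n then
        gs.set (n / 2 - (i + 1) * 3).toNat "(-_-" else gs)
    (fun _ _ => rfl) ((n - n / 2) / 3).toNat
    ((List.replicate n.toNat "").set (n / 2).toNat "(-_-)") hp1len
  have hsclen : ((List.range ((n - n / 2) / 3).toNat).foldl
      (fun gs (k : Nat) =>
        (fun gs i =>
          if 0 ≤ n / 2 + (i + 1) * 3 ∧ n / 2 + (i + 1) * 3 < n then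
            (if 0 ≤ n / 2 - (i + 1) * 3 ∧ n / 2 - (i + 1) * 3 < n then
              gs.set (n / 2 - (i + 1) * 3).toNat "(-_-" else gs).set (n / 2 + (i + 1) * 3).toNat "-_-)"
          else if 0 ≤ n / 2 - (i + 1) * 3 ∧ n / 2 - (i + 1) * 3 < n then
            gs.set (n / 2 - (i + 1) * 3).toNat "(-_-" else gs) gs ((0 : Int) + (k : Int)))
      ((List.replicate n.toNat "").set (n / 2).toNat "(-_-)")).length = n.toNat := by
    rw [foldl_len]
    · exact hp1len
    · intro gs i; dsimp only; split_ifs <;> simp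
  have hfi := fill_get n hn1
    (fun gs i =>
      if ((PySem.List.pyGet? gs i).getD "") ≠ "" then gs
      else if i < n / 2 then gs.set i.toNat "(-_"
      else gs.set i.toNat "_-)")
    (fun _ _ => rfl) n.toNat
    ((List.range ((n - n / 2) / 3).toNat).foldl
      (fun gs (k : Nat) =>
        (fun gs i =>
          if 0 ≤ n / 2 + (i + 1) * 3 ∧ n / 2 + (i + 1) * 3 < n then
            (if 0 ≤ n / 2 - (i + 1) * 3 ∧ n / 2 - (i + 1) * 3 < n then
              gs.set (n / 2 - (i + 1) * 3).toNat "(-_-" else gs).set (n / 2 + (i + 1) * 3).toNat "-_-)"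
          else if 0 ≤ n / 2 - (i + 1) * 3 ∧ n / 2 - (i + 1) * 3 < n then
            gs.set (n / 2 - (i + 1) * 3).toNat "(-_-" else gs) gs ((0 : Int) + (k : Int)))
      ((List.replicate n.toNat "").set (n / 2).toNat "(-_-)"))
    hsclen le_rfl
  have hfilen : ∀ (gs : List String), ((List.range n.toNat).foldl
      (fun gs (k : Nat) =>
        (fun gs i =>
          if ((PySem.List.pyGet? gs i).getD "") ≠ "" then gs
          else if i < n / 2 then gs.set i.toNat "(-_"
          else gs.set i.toNat "_-)") gs ((0 : Int) + (k : Int))) gs).length = gs.length := by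
    intro gs
    rw [foldl_len]
    intro gs i; dsimp only; split_ifs <;> simp
  by_cases h7 : n > 7
  · rw [if_pos h7]
    apply congrArg
    apply List.ext_getElem
    · simp only [List.length_set]; rw [hfilen, hsclen]; simp
    intro j h1 h2
    have hjN : j < n.toNat := by simpa using h2
    rw [List.getElem_map, List.getElem_range, ← List.getD_eq_getElem _ _ h1]
    rw [getD_set, getD_set]
    simp only [List.length_set, hfilen, hsclen]
    rw [hfi j hjN, hsc j (by omega), hp1get j]
    simp only [if_pos hjN]
    clear hsc hfi hp1get hp1len hsclen hfilen h h1 h2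
    split_ifs <;> first | rfl | omega | (exfalso; simp_all)
  · rw [if_neg h7]
    apply congrArg
    apply List.ext_getElem
    · rw [hfilen, hsclen]; simp
    intro j h1 h2
    have hjN : j < n.toNat := by simpa using h2
    rw [List.getElem_map, List.getElem_range, ← List.getD_eq_getElem _ _ h1]
    rw [hfi j hjN, hsc j (by omega), hp1get j]
    simp only [if_pos hjN]
    clear hsc hfi hp1get hp1len hsclen hfilen h h1 h2
    split_ifs <;> first | rfl | omega | (exfalso; simp_all)

-- ===== VERDICT (by name: the statement is the Claim_ definition above) =====
theorem mob_spec : Claim_equal_mob := by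
  intro n _
  unfold Spec_mob
  by_cases h : n = 0 ∨ ¬ (1 ≤ n ∧ n ≤ 255)
  · simp only [mob, mob_alt, if_pos h]
  · exact mob_spec' n h
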